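-- pv_equiv track=rewrite | github.com/spoorthy-n-swamy/Personalized-Finance-Chatbot | backend/services/budget_analysis.py | _create_optimization_timeline
-- ===== SOURCE A (Python) =====
-- from typing import Dict, List, Optional, Tuple
--
-- def _create_optimization_timeline(optimizations: List[Dict]) -> List[Dict[str, str]]:
--     """Create an implementation timeline for optimizations"""
--
--     timeline = []
--
--     # Sort by difficulty and potential impact
--     easy_wins = [opt for opt in optimizations if opt.get("difficulty") == "easy"]
--     moderate_changes = [opt for opt in optimizations if opt.get("difficulty") == "moderate"]
--
--     # Week 1-2: Easy wins
--     if easy_wins: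
--         timeline.append({
--             "timeframe": "Week 1-2",
--             "actions": f"Implement easy changes in {', '.join([opt['category'] for opt in easy_wins[:2]])}"
--         })
--
--     # Month 1: Moderate changes
--     if moderate_changes:
--         timeline.append({
--             "timeframe": "Month 1",
--             "actions": f"Work on {', '.join([opt['category'] for opt in moderate_changes[:2]])}"
--         })
--
--     # Month 2-3: Review and adjust
--     timeline.append({
--         "timeframe": "Month 2-3",
--         "actions": "Review progress and fine-tune budget allocations"
--     })
--
--     return timeline
-- ===== SOURCE B (Python) =====
-- def _create_optimization_timeline(optimizations):
--     """Create an implementation timeline for optimizations (single-pass bucketing)."""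
--     easy_cats, easy_seen = [], False
--     mod_cats, mod_seen = [], False
--     for opt in optimizations:
--         d = opt.get("difficulty")
--         if d == "easy":
--             easy_seen = True
--             if len(easy_cats) < 2:
--                 easy_cats.append(opt["category"])
--         elif d == "moderate":
--             mod_seen = True
--             if len(mod_cats) < 2:
--                 mod_cats.append(opt["category"])
--     timeline = []
--     if easy_seen:
--         timeline.append({"timeframe": "Week 1-2",
--                          "actions": "Implement easy changes in " + ", ".join(easy_cats)})
--     if mod_seen:
--         timeline.append({"timeframe": "Month 1",
--                          "actions": "Work on " + ", ".join(mod_cats)})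
--     timeline.append({"timeframe": "Month 2-3",
--                      "actions": "Review progress and fine-tune budget allocations"})
--     return timeline
-- ===== Notes on version B (the rewrite author's own statement) =====
-- stated objective: alternative
-- what changed: Replaces A's two full filter passes (which materialize both filtered lists and then re-scan their prefixes for categories) by a single pass over the input that maintains only a seen-flag and the first two category strings per difficulty.
import Mathlib
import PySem

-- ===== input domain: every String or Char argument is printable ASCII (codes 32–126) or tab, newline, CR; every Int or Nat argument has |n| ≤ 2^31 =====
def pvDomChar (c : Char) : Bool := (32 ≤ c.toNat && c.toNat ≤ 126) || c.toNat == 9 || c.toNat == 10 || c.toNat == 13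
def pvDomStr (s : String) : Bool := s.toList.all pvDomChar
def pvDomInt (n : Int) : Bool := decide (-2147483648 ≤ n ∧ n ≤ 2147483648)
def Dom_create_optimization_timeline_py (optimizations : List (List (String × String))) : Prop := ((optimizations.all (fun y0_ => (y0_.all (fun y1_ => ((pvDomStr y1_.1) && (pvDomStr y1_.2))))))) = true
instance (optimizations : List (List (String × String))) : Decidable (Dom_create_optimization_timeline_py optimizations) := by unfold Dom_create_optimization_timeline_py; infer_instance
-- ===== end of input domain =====

-- B replaces A's two filter passes with one accumulating pass keeping only the first two
-- category strings and a seen-flag per difficulty; same return value on Pre_ (alternative decomposition).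


-- ===== PORT A =====
-- opt['category']: `none` = Python KeyError, excluded by Pre_; inside Pre_ the key is present.
def pvCat (opt : List (String × String)) : String := (opt.lookup "category").getD ""

def create_optimization_timeline_py (optimizations : List (List (String × String))) : List (List (String × String)) :=
  let easy_wins := optimizations.filter (fun opt => opt.lookup "difficulty" == some "easy")
  let moderate_changes := optimizations.filter (fun opt => opt.lookup "difficulty" == some "moderate")
  (if !easy_wins.isEmpty then
    [[("timeframe", "Week 1-2"),
      ("actions", "Implement easy changes in " ++ PySem.Str.join ", " ((easy_wins.take 2).map pvCat))]]
   else [])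
  ++
  (if !moderate_changes.isEmpty then
    [[("timeframe", "Month 1"),
      ("actions", "Work on " ++ PySem.Str.join ", " ((moderate_changes.take 2).map pvCat))]]
   else [])
  ++ [[("timeframe", "Month 2-3"),
       ("actions", "Review progress and fine-tune budget allocations")]]

-- ===== PORT B =====
-- the single pass of Source B: state = (easy categories so far, easy seen, moderate categories so far, moderate seen)
def pvGo : List (List (String × String)) → List String → Bool → List String → Bool →
    List String × Bool × List String × Bool
  | [], ec, es, mc, ms => (ec, es, mc, ms)
  | opt :: rest, ec, es, mc, ms =>
    let d := opt.lookup "difficulty"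
    if d == some "easy" then
      pvGo rest (if ec.length < 2 then ec ++ [pvCat opt] else ec) true mc ms
    else if d == some "moderate" then
      pvGo rest ec es (if mc.length < 2 then mc ++ [pvCat opt] else mc) true
    else
      pvGo rest ec es mc ms

def create_optimization_timeline_py_alt (optimizations : List (List (String × String))) : List (List (String × String)) :=
  let st := pvGo optimizations [] false [] false
  (if st.2.1 then
    [[("timeframe", "Week 1-2"),
      ("actions", "Implement easy changes in " ++ PySem.Str.join ", " st.1)]]
   else [])
  ++
  (if st.2.2.2 then
    [[("timeframe", "Month 1"),
      ("actions", "Work on " ++ PySem.Str.join ", " st.2.2.1)]]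
   else [])
  ++ [[("timeframe", "Month 2-3"),
       ("actions", "Review progress and fine-tune budget allocations")]]

-- ===== PRECONDITION & SPEC =====
-- Pre_ excludes inputs where Python raises KeyError: a dict among the first two easy
-- (resp. first two moderate) optimizations lacking the key "category".
def Pre_create_optimization_timeline_py (optimizations : List (List (String × String))) : Prop :=
  (∀ opt ∈ (optimizations.filter (fun opt => opt.lookup "difficulty" == some "easy")).take 2,
      (opt.lookup "category").isSome) ∧
  (∀ opt ∈ (optimizations.filter (fun opt => opt.lookup "difficulty" == some "moderate")).take 2,
      (opt.lookup "category").isSome)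
instance (optimizations : List (List (String × String))) : Decidable (Pre_create_optimization_timeline_py optimizations) := by unfold Pre_create_optimization_timeline_py; infer_instance

def pvWitness_create_optimization_timeline_py : (List (List (String × String))) :=
  [[("difficulty", "easy"), ("category", "dining")],
   [("difficulty", "moderate"), ("category", "rent")],
   [("difficulty", "hard"), ("category", "housing")]]

def Spec_create_optimization_timeline_py (optimizations : List (List (String × String))) (out : List (List (String × String))) : Prop := out = create_optimization_timeline_py_alt optimizations
instance (optimizations : List (List (String × String))) (out : List (List (String × String))) : Decidable (Spec_create_optimization_timeline_py optimizations out) := by unfold Spec_create_optimization_timeline_py; infer_instance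

-- ===== CLAIM (what is proved, stated in full; the proofs are below) =====
def Claim_equal_create_optimization_timeline_py : Prop := ∀ (optimizations : List (List (String × String))), Dom_create_optimization_timeline_py optimizations → Pre_create_optimization_timeline_py optimizations → Spec_create_optimization_timeline_py optimizations (create_optimization_timeline_py optimizations)

-- ===== LEMMAS AND PROOFS =====

-- The fold of B computes: capped category prefixes and emptiness flags of A's filtered lists.
theorem take_two_append_of_len2 {pre : List String} (l : List String) (h : pre.length = 2) :
    (pre ++ l).take 2 = pre := by
  rw [List.take_append_of_le_length (by omega), List.take_of_length_le (by omega)]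

theorem pvGo_spec (xs : List (List (String × String))) :
    ∀ (ec : List String) (es : Bool) (mc : List String) (ms : Bool),
    ec.length ≤ 2 → mc.length ≤ 2 →
    pvGo xs ec es mc ms =
      ((ec ++ (xs.filter (fun opt => opt.lookup "difficulty" == some "easy")).map pvCat).take 2,
       es || !(xs.filter (fun opt => opt.lookup "difficulty" == some "easy")).isEmpty,
       (mc ++ (xs.filter (fun opt => opt.lookup "difficulty" == some "moderate")).map pvCat).take 2,
       ms || !(xs.filter (fun opt => opt.lookup "difficulty" == some "moderate")).isEmpty) := by
  induction xs with
  | nil =>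
    intro ec es mc ms hec hmc
    simp [pvGo, List.take_of_length_le hec, List.take_of_length_le hmc]
  | cons opt rest ih =>
    intro ec es mc ms hec hmc
    by_cases he : (opt.lookup "difficulty" == some "easy") = true
    · have he' : opt.lookup "difficulty" = some "easy" := by simpa using he
      rw [show pvGo (opt :: rest) ec es mc ms
          = pvGo rest (if ec.length < 2 then ec ++ [pvCat opt] else ec) true mc ms by
            simp [pvGo, he']]
      by_cases hlt : ec.length < 2
      · rw [if_pos hlt, ih _ _ _ _ (by simp; omega) hmc]
        simp [he']
      · have h2 : ec.length = 2 := by omega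
        rw [if_neg hlt, ih _ _ _ _ hec hmc]
        simp only [List.filter_cons, he']
        rw [take_two_append_of_len2 _ h2, take_two_append_of_len2 _ h2]
        simp
    · by_cases hm : (opt.lookup "difficulty" == some "moderate") = true
      · have hm' : opt.lookup "difficulty" = some "moderate" := by simpa using hm
        rw [show pvGo (opt :: rest) ec es mc ms
            = pvGo rest ec es (if mc.length < 2 then mc ++ [pvCat opt] else mc) true by
              simp [pvGo, hm']]
        by_cases hlt : mc.length < 2
        · rw [if_pos hlt, ih _ _ _ _ hec (by simp; omega)]
          simp [hm']
        · have h2 : mc.length = 2 := by omega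
          rw [if_neg hlt, ih _ _ _ _ hec hmc]
          simp only [List.filter_cons, hm']
          rw [take_two_append_of_len2 _ h2, take_two_append_of_len2 _ h2]
          simp
      · rw [show pvGo (opt :: rest) ec es mc ms = pvGo rest ec es mc ms by
              simp [pvGo, he, hm]]
        rw [ih _ _ _ _ hec hmc]
        simp [he, hm]

-- ===== VERDICT (by name: the statement is the Claim_ definition above) =====
theorem create_optimization_timeline_py_spec : Claim_equal_create_optimization_timeline_py := by
  intro optimizations _ _
  unfold Spec_create_optimization_timeline_py
  unfold create_optimization_timeline_py create_optimization_timeline_py_alt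
  rw [pvGo_spec optimizations [] false [] false (by simp) (by simp)]
  simp [List.map_take]
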